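-- pv_equiv track=rewrite | github.com/Jobberson/Python-For-Uni | Constraint Satisfaction Problems/Algorithms/Exercise 1.py | backtrack
-- ===== SOURCE A (Python) =====
-- options = [
--     [10, 5, 2],  # day 1
--     [5, 2],      # day 2
--     [2, 0],      # day 3
--     [10, 5, 2],  # day 4
--     [0]          # day 5
-- ]
--
-- max_irrigation = 20
--
-- def backtrack(day, currentIrrigation, currentSum):
--     if day == len(options): # all days have been processed
--         if currentSum <= max_irrigation:
--             return currentIrrigation.copy() # that's the solution
--         else:
--             return None # to much irrigation
--
--     for amount in options[day]:
--         if currentSum + amount > max_irrigation: # if too much irrigation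
--             continue # skip this amount
--
--         currentIrrigation.append(amount) #if not too much irrigation, add it to the current irrigation
--
--         # then recurse to the next day
--         result = backtrack(day + 1, currentIrrigation, currentSum + amount)
--
--         # if there's a solution, return it
--         if result is not None:
--             return result
--
--         # if not, remove the last amount added
--         currentIrrigation.pop()
--
--     # if no solution was found, return None
--     return None
-- ===== SOURCE B (Python) =====
-- options = [
--     [10, 5, 2],  # day 1
--     [5, 2],      # day 2
--     [2, 0],      # day 3
--     [10, 5, 2],  # day 4
--     [0]          # day 5
-- ]
--
-- max_irrigation = 20
--
-- def backtrack(day, currentIrrigation, currentSum):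
--     # Iterative depth-first search with an explicit stack of (day, sum, next-option-index)
--     # frames, replacing the recursion; same mutation of currentIrrigation as the recursive
--     # version (left extended on success, restored on failure).
--     stack = [[day, currentSum, 0]]
--     while stack:
--         frame = stack[-1]
--         d, s, i = frame
--         if d == len(options):
--             if s <= max_irrigation:
--                 return currentIrrigation.copy()
--         elif i < len(options[d]):
--             frame[2] = i + 1
--             amount = options[d][i]
--             if s + amount <= max_irrigation:
--                 currentIrrigation.append(amount)
--                 stack.append([d + 1, s + amount, 0])
--             continue
--         stack.pop()
--         if stack:
--             currentIrrigation.pop()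
--     return None
-- ===== Notes on version B (the rewrite author's own statement) =====
-- stated objective: alternative
-- what changed: The recursive backtracking over the fixed options table is replaced by an iterative depth-first search with an explicit stack of (day, sum, next-option-index) frames, descending/backtracking by pushing/popping frames instead of by function calls, with the same option order, pruning and in-place mutation of currentIrrigation.
import Mathlib
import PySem

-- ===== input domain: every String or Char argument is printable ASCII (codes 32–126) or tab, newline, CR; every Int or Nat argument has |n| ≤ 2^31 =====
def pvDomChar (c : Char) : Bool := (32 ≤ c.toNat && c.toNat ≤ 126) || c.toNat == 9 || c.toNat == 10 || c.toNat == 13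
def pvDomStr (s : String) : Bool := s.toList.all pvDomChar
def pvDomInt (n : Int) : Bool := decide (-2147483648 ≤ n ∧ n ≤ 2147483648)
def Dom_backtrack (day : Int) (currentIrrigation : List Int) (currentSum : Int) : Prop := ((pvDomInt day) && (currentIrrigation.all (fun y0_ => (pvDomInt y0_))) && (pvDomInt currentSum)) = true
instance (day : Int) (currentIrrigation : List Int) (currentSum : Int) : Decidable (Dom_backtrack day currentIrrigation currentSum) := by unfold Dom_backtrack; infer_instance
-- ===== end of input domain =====

-- B replaces A's recursive backtracking by an iterative explicit-stack DFS (same option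
-- order, same pruning); equivalence is about the RETURN value only — both Pythons mutate
-- currentIrrigation identically (extended on success, restored on failure).

-- ===== PORT A =====
-- the module-level table `options` and `max_irrigation = 20`
def pvOptions : List (List Int) := [[10, 5, 2], [5, 2], [2, 0], [10, 5, 2], [0]]

-- A recurses on `day`; the Nat fuel only makes the recursion structural: inside Pre_
-- (day ∈ [-5,5]) the recursion depth is at most 11, so fuel 16 is never exhausted.
-- `options[day]` raising IndexError (day outside [-5,5]) is modelled by `none` (outside Pre_).
mutual
def pvBF : Nat → Int → List Int → Int → Option (List Int)
  | 0, _, _, _ => none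
  | f + 1, day, ci, cs =>
    if day = 5 then               -- day == len(options)
      if cs ≤ 20 then some ci else none
    else
      match PySem.List.pyGet? pvOptions day with
      | none => none              -- IndexError (outside Pre_)
      | some row => pvLoopA f day ci cs row
termination_by f _ _ _ => (f, 0)

-- the `for amount in options[day]` loop; `ci.append`/`pop` around the recursive call
-- become recursing with `ci ++ [a]` and continuing with `ci`
def pvLoopA : Nat → Int → List Int → Int → List Int → Option (List Int)
  | _, _, _, _, [] => none
  | f, day, ci, cs, a :: rest =>
    if cs + a > 20 then pvLoopA f day ci cs rest
    else
      match pvBF f (day + 1) (ci ++ [a]) (cs + a) with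
      | some r => some r
      | none => pvLoopA f day ci cs rest
termination_by f _ _ _ r => (f, r.length + 1)
end

def backtrack (day : Int) (currentIrrigation : List Int) (currentSum : Int) : Option (List Int) :=
  pvBF 16 day currentIrrigation currentSum

-- ===== PORT B =====
-- the `while stack:` loop of Source B; a frame is (day, sum, next-option-index); the Nat fuel
-- only makes the loop structural: the DFS from any day in [-5,5] takes < 7000 iterations,
-- so fuel 100000 is never exhausted.  `len(options[d])` raising IndexError → none.
def pvStep : Nat → List (Int × Int × Nat) → List Int → Option (List Int)
  | 0, _, _ => none
  | _ + 1, [], _ => none                    -- while exits: return None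
  | f + 1, (d, s, i) :: rest, ci =>
    if d = 5 then
      if s ≤ 20 then some ci                -- return currentIrrigation.copy()
      else match rest with                  -- stack.pop(); if stack: currentIrrigation.pop()
        | [] => pvStep f [] ci
        | _ :: _ => pvStep f rest ci.dropLast
    else
      match PySem.List.pyGet? pvOptions d with
      | none => none                        -- IndexError (outside Pre_)
      | some row =>
        if h : i < row.length then
          if s + row[i] ≤ 20 then           -- frame[2] = i+1; append; push
            pvStep f ((d + 1, s + row[i], 0) :: (d, s, i + 1) :: rest) (ci ++ [row[i]])
          else
            pvStep f ((d, s, i + 1) :: rest) ci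
        else match rest with                -- options exhausted: pop
          | [] => pvStep f [] ci
          | _ :: _ => pvStep f rest ci.dropLast

def backtrack_alt (day : Int) (currentIrrigation : List Int) (currentSum : Int) : Option (List Int) :=
  pvStep 100000 [(day, currentSum, 0)] currentIrrigation

-- ===== PRECONDITION & SPEC =====
-- Exactly the inputs on which the Python A returns: for day outside [-5, 5] the access
-- options[day] raises IndexError (negative days index from the end, as in Python).
def Pre_backtrack (day : Int) (currentIrrigation : List Int) (currentSum : Int) : Prop :=
  -5 ≤ day ∧ day ≤ 5
instance (day : Int) (currentIrrigation : List Int) (currentSum : Int) : Decidable (Pre_backtrack day currentIrrigation currentSum) := by unfold Pre_backtrack; infer_instance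

def pvWitness_backtrack : Int × List Int × Int := (0, [], 0)

def Spec_backtrack (day : Int) (currentIrrigation : List Int) (currentSum : Int) (out : Option (List Int)) : Prop := out = backtrack_alt day currentIrrigation currentSum
instance (day : Int) (currentIrrigation : List Int) (currentSum : Int) (out : Option (List Int)) : Decidable (Spec_backtrack day currentIrrigation currentSum out) := by unfold Spec_backtrack; infer_instance

-- ===== CLAIM (what is proved, stated in full; the proofs are below) =====
def Claim_equal_backtrack : Prop := ∀ (day : Int) (currentIrrigation : List Int) (currentSum : Int), Dom_backtrack day currentIrrigation currentSum → Pre_backtrack day currentIrrigation currentSum → Spec_backtrack day currentIrrigation currentSum (backtrack day currentIrrigation currentSum)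

-- ===== LEMMAS AND PROOFS =====

-- a row exists exactly for day ∈ [-5, 4]
lemma pvRow_bound {d : Int} {row : List Int} (h : PySem.List.pyGet? pvOptions d = some row) :
    -5 ≤ d ∧ d ≤ 4 := by
  by_contra hc
  have hn : PySem.List.pyGet? pvOptions d = none := by
    rw [PySem.List.pyGet?_eq_none_iff]
    simp only [PySem.Raise.InRange, pvOptions, List.length] at *
    simp at *
    omega
  rw [hn] at h
  simp at h

lemma pvRow_exists {d : Int} (h1 : -5 ≤ d) (h2 : d ≤ 4) :
    PySem.List.pyGet? pvOptions d ≠ none := by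
  rw [ne_eq, PySem.List.pyGet?_eq_none_iff]
  simp [PySem.Raise.InRange, pvOptions]
  omega

-- fuel monotonicity for A's port: with fuel above the remaining recursion depth the
-- result does not depend on the fuel
lemma pv_mono (f1 : Nat) :
    (∀ f2 d ci cs, (6 - d).toNat < f1 → (6 - d).toNat < f2 → pvBF f1 d ci cs = pvBF f2 d ci cs) ∧
    (∀ f2 d ci cs r, (5 - d).toNat < f1 → (5 - d).toNat < f2 → pvLoopA f1 d ci cs r = pvLoopA f2 d ci cs r) := by
  induction f1 with
  | zero => exact ⟨fun _ _ _ _ h => absurd h (by omega), fun _ _ _ _ _ h => absurd h (by omega)⟩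
  | succ f ih =>
    have hBF : ∀ f2 d ci cs, (6 - d).toNat < f + 1 → (6 - d).toNat < f2 →
        pvBF (f + 1) d ci cs = pvBF f2 d ci cs := by
      intro f2 d ci cs h1 h2
      match f2 with
      | 0 => omega
      | f2' + 1 =>
        simp only [pvBF]
        split
        · rfl
        · cases hrow : PySem.List.pyGet? pvOptions d with
          | none => rfl
          | some row =>
            have hb := pvRow_bound hrow
            exact ih.2 f2' d ci cs row (by omega) (by omega)
    refine ⟨hBF, ?_⟩
    intro f2 d ci cs r h1 h2
    induction r with
    | nil => simp [pvLoopA]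
    | cons a rest ihr =>
      simp only [pvLoopA]
      rw [hBF f2 (d + 1) (ci ++ [a]) (cs + a) (by omega) (by omega)]
      split
      · exact ihr
      · cases pvBF f2 (d + 1) (ci ++ [a]) (cs + a) with
        | some r' => rfl
        | none => exact ihr

-- denotation of a stack of B-frames in terms of A's loop: resume the top frame at its
-- saved option index; on failure pop the frame together with its appended amount
def pvDen : List (Int × Int × Nat) → List Int → Option (List Int)
  | [], _ => none
  | (d, s, i) :: rest, ci =>
    if d = 5 then
      if s ≤ 20 then some ci else pvDen rest ci.dropLast
    else
      match PySem.List.pyGet? pvOptions d with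
      | none => none
      | some row =>
        match pvLoopA 15 d ci s (row.drop i) with
        | some r => some r
        | none => pvDen rest ci.dropLast

-- iteration count of a full DFS from a fresh frame at day d (hard-coded table)
def pvW : Int → Nat
  | 5 => 1 | 4 => 3 | 3 => 13 | 2 => 29 | 1 => 61 | 0 => 187
  | -1 => 189 | -2 => 571 | -3 => 1145 | -4 => 2293 | -5 => 6883
  | _ => 1

lemma pvW_pos (d : Int) : 1 ≤ pvW d := by
  unfold pvW; split <;> omega

lemma pvW_le (d : Int) : pvW d ≤ 6883 := by
  unfold pvW; split <;> omega

lemma pvW_eq {d : Int} {row : List Int} (h : PySem.List.pyGet? pvOptions d = some row) :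
    pvW d = row.length * (1 + pvW (d + 1)) + 1 := by
  obtain ⟨h1, h2⟩ := pvRow_bound h
  have key : pvW d = ((PySem.List.pyGet? pvOptions d).getD []).length * (1 + pvW (d + 1)) + 1 := by
    have hd : d = -5 ∨ d = -4 ∨ d = -3 ∨ d = -2 ∨ d = -1 ∨ d = 0 ∨ d = 1 ∨ d = 2 ∨ d = 3 ∨ d = 4 := by
      omega
    rcases hd with rfl | rfl | rfl | rfl | rfl | rfl | rfl | rfl | rfl | rfl <;> decide
  rw [h] at key
  simpa using key

-- remaining iteration count of a frame, and of a whole stack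
def pvFC : Int × Int × Nat → Nat
  | (d, _, i) =>
    if d = 5 then 1
    else
      match PySem.List.pyGet? pvOptions d with
      | none => 1
      | some row => (row.length - i) * (1 + pvW (d + 1)) + 1

def pvCost (st : List (Int × Int × Nat)) : Nat := (st.map pvFC).sum

lemma pvFC_pos (fr : Int × Int × Nat) : 1 ≤ pvFC fr := by
  rcases fr with ⟨d, s, i⟩
  simp only [pvFC]
  split
  · omega
  · cases PySem.List.pyGet? pvOptions d <;> simp

lemma pvFC_le_W (d s : Int) : pvFC (d, s, 0) ≤ pvW d := by
  simp only [pvFC]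
  split
  · rename_i h5; subst h5; simp [pvW]
  · cases h : PySem.List.pyGet? pvOptions d with
    | none => exact pvW_pos d
    | some row => rw [pvW_eq h]; simp

lemma pvStep_nil (f : Nat) (ci : List Int) : pvStep f [] ci = none := by
  cases f <;> simp [pvStep]

-- the simulation: with fuel at least the stack's remaining iteration count, B's stack
-- machine computes the stack's denotation
lemma pvSim : ∀ (f : Nat) (st : List (Int × Int × Nat)) (ci : List Int),
    pvCost st ≤ f → pvStep f st ci = pvDen st ci := by
  intro f
  induction f with
  | zero =>
    intro st ci h
    cases st with
    | nil => simp [pvStep, pvDen]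
    | cons fr rest =>
      exfalso
      have := pvFC_pos fr
      simp [pvCost] at h
      omega
  | succ f ih =>
    intro st ci h
    cases st with
    | nil => simp [pvStep, pvDen]
    | cons fr rest =>
      rcases fr with ⟨d, s, i⟩
      have hrest : pvCost rest ≤ f := by
        have := pvFC_pos (d, s, i)
        simp [pvCost] at h ⊢
        omega
      simp only [pvStep, pvDen]
      by_cases hd : d = 5
      · rw [if_pos hd, if_pos hd]
        by_cases hs5 : s ≤ 20
        · rw [if_pos hs5, if_pos hs5]
        · rw [if_neg hs5, if_neg hs5]
          cases rest with
          | nil => simp [pvStep_nil, pvDen]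
          | cons fr' rest' => exact ih _ _ hrest
      · rw [if_neg hd, if_neg hd]
        cases hrow : PySem.List.pyGet? pvOptions d with
        | none => rfl
        | some row =>
          have hb := pvRow_bound hrow
          have hfc : pvFC (d, s, i) = (row.length - i) * (1 + pvW (d + 1)) + 1 := by
            simp [pvFC, hd, hrow]
          by_cases hi : i < row.length
          · simp only [dif_pos hi]
            have hdrop : row.drop i = row[i] :: row.drop (i + 1) :=
              (List.getElem_cons_drop hi).symm
            have hfc' : pvFC (d, s, i + 1) = (row.length - (i + 1)) * (1 + pvW (d + 1)) + 1 := by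
              simp [pvFC, hd, hrow]
            have hprod : (row.length - i) * (1 + pvW (d + 1)) =
                (row.length - (i + 1)) * (1 + pvW (d + 1)) + (1 + pvW (d + 1)) := by
              have hli : row.length - i = (row.length - (i + 1)) + 1 := by omega
              rw [hli, Nat.add_mul, Nat.one_mul]
            by_cases hs : s + row[i] ≤ 20
            · -- admissible amount: push a fresh frame for day d+1
              rw [if_pos hs]
              have hexp : ∀ (fr : Int × Int × Nat) (l : List (Int × Int × Nat)),
                  pvCost (fr :: l) = pvFC fr + pvCost l := by
                intro fr l; simp [pvCost]
              have hcost : pvCost ((d + 1, s + row[i], 0) :: (d, s, i + 1) :: rest) ≤ f := by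
                have hle := pvFC_le_W (d + 1) (s + row[i])
                rw [hexp, hfc] at h
                rw [hexp, hexp, hfc']
                omega
              rw [ih _ _ hcost]
              have hdl : (ci ++ [row[i]]).dropLast = ci := List.dropLast_concat ..
              have hres : pvDen ((d + 1, s + row[i], 0) :: (d, s, i + 1) :: rest) (ci ++ [row[i]]) =
                  match pvBF 15 (d + 1) (ci ++ [row[i]]) (s + row[i]) with
                  | some r => some r
                  | none => pvDen ((d, s, i + 1) :: rest) ci := by
                by_cases h5 : d + 1 = 5
                · have hbf : pvBF 15 (d + 1) (ci ++ [row[i]]) (s + row[i]) =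
                      if s + row[i] ≤ 20 then some (ci ++ [row[i]]) else none := by
                    show pvBF (14 + 1) _ _ _ = _
                    simp only [pvBF, if_pos h5]
                  simp only [pvDen, if_pos h5, if_pos hs, hbf]
                · obtain ⟨row', hrow'⟩ :=
                    Option.ne_none_iff_exists'.mp (pvRow_exists (d := d + 1) (by omega) (by omega))
                  have hbf : pvBF 15 (d + 1) (ci ++ [row[i]]) (s + row[i]) =
                      pvLoopA 15 (d + 1) (ci ++ [row[i]]) (s + row[i]) row' := by
                    show pvBF (14 + 1) _ _ _ = _
                    simp only [pvBF]
                    rw [if_neg h5, hrow']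
                    exact (pv_mono 14).2 15 (d + 1) (ci ++ [row[i]]) (s + row[i]) row'
                      (by omega) (by omega)
                  simp only [pvDen, if_neg h5, hrow', hdl, List.drop_zero, hbf]
              rw [hres, hdrop]
              have hs' : ¬ s + row[i] > 20 := by omega
              simp only [pvLoopA, if_neg hs']
              cases pvBF 15 (d + 1) (ci ++ [row[i]]) (s + row[i]) with
              | some r => rfl
              | none => simp only [pvDen, if_neg hd, hrow]
            · -- inadmissible amount: advance the option index
              rw [if_neg hs]
              have hexp : ∀ (fr : Int × Int × Nat) (l : List (Int × Int × Nat)),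
                  pvCost (fr :: l) = pvFC fr + pvCost l := by
                intro fr l; simp [pvCost]
              have hcost : pvCost ((d, s, i + 1) :: rest) ≤ f := by
                have hpos := pvW_pos (d + 1)
                rw [hexp, hfc] at h
                rw [hexp, hfc']
                omega
              rw [ih _ _ hcost, hdrop]
              have hs' : s + row[i] > 20 := by omega
              simp only [pvLoopA, if_pos hs']
              simp only [pvDen, if_neg hd, hrow]
          · -- options exhausted: pop
            simp only [dif_neg hi]
            have hdrop : row.drop i = [] := List.drop_eq_nil_of_le (by omega)
            have hloop : pvLoopA 15 d ci s (row.drop i) = none := by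
              rw [hdrop]; simp [pvLoopA]
            rw [hloop]
            cases rest with
            | nil => simp [pvStep_nil, pvDen]
            | cons fr' rest' => exact ih _ _ hrest

-- ===== VERDICT (by name: the statement is the Claim_ definition above) =====
theorem backtrack_spec : Claim_equal_backtrack := by
  intro day ci cs _ _
  unfold Spec_backtrack backtrack backtrack_alt
  have hcost : pvCost [(day, cs, 0)] ≤ 100000 := by
    have h1 := pvFC_le_W day cs
    have h2 := pvW_le day
    have : pvCost [(day, cs, 0)] = pvFC (day, cs, 0) := by simp [pvCost]
    omega
  rw [pvSim 100000 [(day, cs, 0)] ci hcost]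
  show pvBF (15 + 1) day ci cs = _
  simp only [pvBF, pvDen]
  by_cases hd : day = 5
  · simp only [if_pos hd]
  · simp only [if_neg hd]
    cases hrow : PySem.List.pyGet? pvOptions day with
    | none => rfl
    | some row =>
      simp only [List.drop_zero]
      cases pvLoopA 15 day ci cs row <;> rfl
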